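-- pv_equiv track=rewrite | github.com/subszero0/MandiMonitor | bot/ai/multi_card_selector.py | _prioritize_features_for_user
-- ===== SOURCE A (Python) =====
-- from typing import Dict, List, Tuple, Any, Optional
--
-- def _prioritize_features_for_user(user_features: Dict[str, Any]) -> List[str]:
--     """
--     R4.2: Intelligently prioritize features based on user intent and query.
--
--     Args:
--     ----
--         user_features: User requirements and preferences
--
--     Returns:
--     -------
--         Ordered list of features by importance to user
--     """
--     # Base feature set
--     all_features = ['price', 'refresh_rate', 'size', 'resolution', 'panel_type', 'brand', 'curvature', 'connectivity']
--
--     # Analyze user query for intent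
--     user_query = str(user_features.get('user_query', '')).lower()
--
--     # Priority weights based on user intent
--     feature_weights = {}
--
--     # Gaming intent - prioritize performance
--     if any(word in user_query for word in ['gaming', 'game', 'fps', 'esports', 'competitive']):
--         feature_weights.update({
--             'refresh_rate': 10,
--             'size': 8,
--             'resolution': 7,
--             'panel_type': 6,
--             'price': 5
--         })
--
--     # Professional/work intent - prioritize display quality
--     elif any(word in user_query for word in ['work', 'office', 'programming', 'design', 'productivity']):
--         feature_weights.update({
--             'size': 10,
--             'resolution': 9,
--             'panel_type': 7,
--             'connectivity': 6,
--             'price': 5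
--         })
--
--     # Budget-conscious - prioritize value
--     elif any(word in user_query for word in ['cheap', 'budget', 'affordable', 'under']):
--         feature_weights.update({
--             'price': 10,
--             'size': 7,
--             'resolution': 6,
--             'refresh_rate': 5,
--             'brand': 4
--         })
--
--     # Default prioritization
--     else:
--         feature_weights.update({
--             'price': 8,
--             'size': 7,
--             'resolution': 6,
--             'refresh_rate': 5,
--             'brand': 4
--         })
--
--     # Sort features by weight (higher weight = higher priority)
--     prioritized = sorted(all_features, key=lambda f: feature_weights.get(f, 1), reverse=True)
--
--     return prioritized
-- ===== SOURCE B (Python) =====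
-- # Intent table: (keyword group, final feature order). First matching group wins;
-- # budget and default weights yield the same order, so the default order covers both.
-- _INTENT_TABLE = [
--     (['gaming', 'game', 'fps', 'esports', 'competitive'],
--      ['refresh_rate', 'size', 'resolution', 'panel_type', 'price',
--       'brand', 'curvature', 'connectivity']),
--     (['work', 'office', 'programming', 'design', 'productivity'],
--      ['size', 'resolution', 'panel_type', 'connectivity', 'price',
--       'refresh_rate', 'brand', 'curvature']),
-- ]
-- _DEFAULT_ORDER = ['price', 'size', 'resolution', 'refresh_rate', 'brand',
--                   'panel_type', 'curvature', 'connectivity']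
--
-- def _prioritize_features_for_user(user_features):
--     query = str(user_features.get('user_query', '')).lower()
--     for words, order in _INTENT_TABLE:
--         if any(w in query for w in words):
--             return list(order)
--     return list(_DEFAULT_ORDER)
-- ===== Notes on version B (the rewrite author's own statement) =====
-- stated objective: simpler
-- what changed: Replaces the weight dict plus stable sorted(reverse=True) with a scan over a keyword-group table mapping each intent directly to its precomputed final feature order, merging the budget and default branches whose weights yield the identical order.
import Mathlib
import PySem

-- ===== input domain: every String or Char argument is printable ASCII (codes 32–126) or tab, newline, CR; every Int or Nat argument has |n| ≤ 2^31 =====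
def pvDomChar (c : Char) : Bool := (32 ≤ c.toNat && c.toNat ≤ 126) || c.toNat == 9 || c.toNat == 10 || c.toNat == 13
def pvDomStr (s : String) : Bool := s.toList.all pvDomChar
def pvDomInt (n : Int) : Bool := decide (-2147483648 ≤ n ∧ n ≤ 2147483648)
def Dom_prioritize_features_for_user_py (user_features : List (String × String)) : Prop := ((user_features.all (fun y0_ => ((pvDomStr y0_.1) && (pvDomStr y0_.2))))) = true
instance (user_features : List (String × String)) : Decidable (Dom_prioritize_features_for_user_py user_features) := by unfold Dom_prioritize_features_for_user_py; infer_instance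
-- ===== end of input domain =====

-- B replaces the weight dict + stable reverse sort by a direct intent → final-order table (simpler).

-- ===== PORT A =====
def prioritize_features_for_user_py (user_features : List (String × String)) : List String :=
  let all_features : List String :=
    ["price", "refresh_rate", "size", "resolution", "panel_type", "brand", "curvature", "connectivity"]
  -- user_features.get('user_query', '') — assoc list, first match; str() of a str is itself
  let user_query := PySem.Str.lower ((user_features.lookup "user_query").getD "")
  let feature_weights : PySem.Dict String Int :=
    if ["gaming", "game", "fps", "esports", "competitive"].any (fun w => PySem.Str.isIn w user_query) then
      (((((PySem.Dict.empty.insert "refresh_rate" 10).insert "size" 8).insert "resolution" 7).insert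
            "panel_type" 6).insert "price" 5)
    else if ["work", "office", "programming", "design", "productivity"].any (fun w => PySem.Str.isIn w user_query) then
      (((((PySem.Dict.empty.insert "size" 10).insert "resolution" 9).insert "panel_type" 7).insert
            "connectivity" 6).insert "price" 5)
    else if ["cheap", "budget", "affordable", "under"].any (fun w => PySem.Str.isIn w user_query) then
      (((((PySem.Dict.empty.insert "price" 10).insert "size" 7).insert "resolution" 6).insert
            "refresh_rate" 5).insert "brand" 4)
    else
      (((((PySem.Dict.empty.insert "price" 8).insert "size" 7).insert "resolution" 6).insert
            "refresh_rate" 5).insert "brand" 4)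
  PySem.List.sorted all_features (fun f => feature_weights.getD f 1) true

-- ===== PORT B =====
-- Intent table: (keyword group, final feature order); first match wins, else the default order.
def pvDefaultOrder : List String :=
  ["price", "size", "resolution", "refresh_rate", "brand", "panel_type", "curvature", "connectivity"]

def pvIntentTable : List (List String × List String) :=
  [(["gaming", "game", "fps", "esports", "competitive"],
    ["refresh_rate", "size", "resolution", "panel_type", "price", "brand", "curvature", "connectivity"]),
   (["work", "office", "programming", "design", "productivity"],
    ["size", "resolution", "panel_type", "connectivity", "price", "refresh_rate", "brand", "curvature"])]

def pvPick (query : String) : List (List String × List String) → List String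
  | [] => pvDefaultOrder
  | (words, order) :: rest =>
      if words.any (fun w => PySem.Str.isIn w query) then order else pvPick query rest

def prioritize_features_for_user_py_alt (user_features : List (String × String)) : List String :=
  pvPick (PySem.Str.lower ((user_features.lookup "user_query").getD "")) pvIntentTable

-- ===== PRECONDITION & SPEC =====
def Spec_prioritize_features_for_user_py (user_features : List (String × String)) (out : List String) : Prop := out = prioritize_features_for_user_py_alt user_features
instance (user_features : List (String × String)) (out : List String) : Decidable (Spec_prioritize_features_for_user_py user_features out) := by unfold Spec_prioritize_features_for_user_py; infer_instance

-- ===== CLAIM (what is proved, stated in full; the proofs are below) =====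
def Claim_equal_prioritize_features_for_user_py : Prop := ∀ (user_features : List (String × String)), Dom_prioritize_features_for_user_py user_features → Spec_prioritize_features_for_user_py user_features (prioritize_features_for_user_py user_features)

-- ===== LEMMAS AND PROOFS =====

-- ===== VERDICT (by name: the statement is the Claim_ definition above) =====
theorem prioritize_features_for_user_py_spec : Claim_equal_prioritize_features_for_user_py := by
  intro user_features _
  unfold Spec_prioritize_features_for_user_py prioritize_features_for_user_py prioritize_features_for_user_py_alt
  dsimp only [pvIntentTable, pvPick, pvDefaultOrder]
  split_ifs <;> rfl
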